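-- pv_equiv track=rewrite | github.com/AmMilu/AI-Group-Project | src/genetic.py | direction_to_route
-- ===== SOURCE A (Python) =====
-- def direction_to_route(src, dir):
--     route = []
--     route.append(src)
--     prev = src
--     for i in range(len(dir)):
--         if dir[i] == 1:
--             prev = (prev[0], prev[1] - 1)
--             route.append(prev)
--         elif dir[i] == 2:
--             prev = (prev[0], prev[1] + 1)
--             route.append(prev)
--         elif dir[i] == 3:
--             prev = (prev[0] - 1, prev[1])
--             route.append(prev)
--         elif dir[i] == 4:
--             prev = (prev[0] + 1, prev[1])
--             route.append(prev)
--     return route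
-- ===== SOURCE B (Python) =====
-- OFFSETS = {1: (0, -1), 2: (0, 1), 3: (-1, 0), 4: (1, 0)}
--
-- def direction_to_route(src, dir):
--     deltas = [OFFSETS[d] for d in dir if d in OFFSETS]
--     return [(src[0] + sum(dx for dx, _ in deltas[:k]),
--              src[1] + sum(dy for _, dy in deltas[:k]))
--             for k in range(len(deltas) + 1)]
-- ===== Notes on version B (the rewrite author's own statement) =====
-- stated objective: alternative
-- what changed: Replaces the incremental prev-update loop with a map-then-prefix-sum decomposition: invalid codes are filtered while mapping directions to (dx,dy) deltas, and each route point is src plus the component-wise sum of a delta prefix.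
import Mathlib
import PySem

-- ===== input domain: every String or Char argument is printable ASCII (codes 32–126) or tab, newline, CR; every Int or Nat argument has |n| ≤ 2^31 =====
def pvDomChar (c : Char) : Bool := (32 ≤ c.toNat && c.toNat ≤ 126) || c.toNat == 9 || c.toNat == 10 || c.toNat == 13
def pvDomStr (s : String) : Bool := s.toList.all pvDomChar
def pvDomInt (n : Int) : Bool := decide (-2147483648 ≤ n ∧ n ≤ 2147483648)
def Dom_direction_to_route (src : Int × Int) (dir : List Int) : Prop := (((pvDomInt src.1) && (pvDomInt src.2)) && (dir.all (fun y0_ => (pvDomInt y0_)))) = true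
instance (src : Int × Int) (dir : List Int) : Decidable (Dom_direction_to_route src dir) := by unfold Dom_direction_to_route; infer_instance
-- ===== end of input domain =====

-- B replaces A's incremental prev-update loop by a map-to-deltas + prefix-sum decomposition (alternative, not faster).

-- ===== PORT A =====
-- A's loop: appends a new point for each recognised code, carrying `prev`.
def dtrLoopA (prev : Int × Int) : List Int → List (Int × Int)
  | [] => []
  | d :: rest =>
    if d = 1 then
      let p : Int × Int := (prev.1, prev.2 - 1)
      p :: dtrLoopA p rest
    else if d = 2 then
      let p : Int × Int := (prev.1, prev.2 + 1)
      p :: dtrLoopA p rest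
    else if d = 3 then
      let p : Int × Int := (prev.1 - 1, prev.2)
      p :: dtrLoopA p rest
    else if d = 4 then
      let p : Int × Int := (prev.1 + 1, prev.2)
      p :: dtrLoopA p rest
    else dtrLoopA prev rest

def direction_to_route (src : Int × Int) (dir : List Int) : List (Int × Int) :=
  src :: dtrLoopA src dir

-- ===== PORT B =====
-- Source B: OFFSETS lookup (none for invalid codes), deltas by filter-map, route by prefix sums.
def dtrOffset (d : Int) : Option (Int × Int) :=
  if d = 1 then some (0, -1)
  else if d = 2 then some (0, 1)
  else if d = 3 then some (-1, 0)
  else if d = 4 then some (1, 0)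
  else none

def direction_to_route_alt (src : Int × Int) (dir : List Int) : List (Int × Int) :=
  let deltas := dir.filterMap dtrOffset
  (List.range (deltas.length + 1)).map (fun k =>
    (src.1 + (((deltas.take k).map Prod.fst).sum),
     src.2 + (((deltas.take k).map Prod.snd).sum)))

-- ===== PRECONDITION & SPEC =====
def Spec_direction_to_route (src : Int × Int) (dir : List Int) (out : List (Int × Int)) : Prop := out = direction_to_route_alt src dir
instance (src : Int × Int) (dir : List Int) (out : List (Int × Int)) : Decidable (Spec_direction_to_route src dir out) := by unfold Spec_direction_to_route; infer_instance

-- ===== CLAIM (what is proved, stated in full; the proofs are below) =====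
def Claim_equal_direction_to_route : Prop := ∀ (src : Int × Int) (dir : List Int), Dom_direction_to_route src dir → Spec_direction_to_route src dir (direction_to_route src dir)

-- ===== LEMMAS AND PROOFS =====

-- prefix-sum form of B, parameterised by the delta list
def dtrPrefix (src : Int × Int) (deltas : List (Int × Int)) : List (Int × Int) :=
  (List.range (deltas.length + 1)).map (fun k =>
    (src.1 + (((deltas.take k).map Prod.fst).sum),
     src.2 + (((deltas.take k).map Prod.snd).sum)))

lemma dtrPrefix_nil (src : Int × Int) : dtrPrefix src [] = [src] := by
  simp [dtrPrefix]

lemma dtrPrefix_cons (src δ : Int × Int) (deltas : List (Int × Int)) :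
    dtrPrefix src (δ :: deltas) = src :: dtrPrefix (src.1 + δ.1, src.2 + δ.2) deltas := by
  simp only [dtrPrefix, List.length_cons]
  rw [List.range_succ_eq_map, List.map_cons, List.map_map]
  refine congrArg₂ List.cons (by simp) ?_
  apply List.map_congr_left
  intro k _
  simp [List.take_succ_cons, add_assoc]

lemma dtrLoop_eq (prev : Int × Int) (dir : List Int) :
    prev :: dtrLoopA prev dir = dtrPrefix prev (dir.filterMap dtrOffset) := by
  induction dir generalizing prev with
  | nil => simp [dtrLoopA, dtrPrefix_nil]
  | cons d rest ih =>
    by_cases h1 : d = 1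
    · have hoff : dtrOffset d = some (0, -1) := by simp [dtrOffset, h1]
      rw [List.filterMap_cons_some hoff, dtrPrefix_cons, ← ih]
      simp [dtrLoopA, h1, sub_eq_add_neg]
    · by_cases h2 : d = 2
      · have hoff : dtrOffset d = some (0, 1) := by simp [dtrOffset, h2]
        rw [List.filterMap_cons_some hoff, dtrPrefix_cons, ← ih]
        simp [dtrLoopA, h2]
      · by_cases h3 : d = 3
        · have hoff : dtrOffset d = some (-1, 0) := by simp [dtrOffset, h3]
          rw [List.filterMap_cons_some hoff, dtrPrefix_cons, ← ih]
          simp [dtrLoopA, h3, sub_eq_add_neg]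
        · by_cases h4 : d = 4
          · have hoff : dtrOffset d = some (1, 0) := by simp [dtrOffset, h4]
            rw [List.filterMap_cons_some hoff, dtrPrefix_cons, ← ih]
            simp [dtrLoopA, h4]
          · have hoff : dtrOffset d = none := by simp [dtrOffset, h1, h2, h3, h4]
            rw [List.filterMap_cons_none hoff, ← ih]
            simp [dtrLoopA, h1, h2, h3, h4]

-- ===== VERDICT (by name: the statement is the Claim_ definition above) =====
theorem direction_to_route_spec : Claim_equal_direction_to_route := by
  intro src dir _
  unfold Spec_direction_to_route direction_to_route direction_to_route_alt
  exact dtrLoop_eq src dir
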